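-- pv_equiv track=rewrite | github.com/NekitPnt/santa_bot | lib/keyboardCreator.py | text_to_keyboard_converter
-- ===== SOURCE A (Python) =====
-- from typing import List
--
-- def text_to_keyboard_converter(text: str) -> List[List[List[str]]]:
--     keyboard: list = text.split('\n')
--     for i in range(len(keyboard)):
--         keyboard[i] = keyboard[i].split('///')
--     for i in range(len(keyboard)):
--         if len(keyboard[i]) == 1:
--             if len(keyboard[i][0]) > 38:
--                 raise ValueError(f"Too long button text")
--             else:
--                 # добавляем кнопку в ряд если она одна
--                 if all(br in keyboard[i][0] for br in ['(', ')']):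
--                     url_button = get_button_url_from_brackets(keyboard[i][0])
--                     keyboard[i][0] = [url_button['button_title'], '', '', url_button['url']]
--                 else:
--                     keyboard[i] = [keyboard[i]]
--         elif 1 < len(keyboard[i]) <= 4:
--             for j in range(len(keyboard[i])):
--                 if len(keyboard[i][j]) > 38:
--                     raise ValueError(f"Too long button text")
--                 else:
--                     if all(br in keyboard[i][j] for br in ['(', ')']):
--                         if len(keyboard[i]) > 2:
--                             raise ValueError(f"Only ONE url-button in a row")
--                         else:
--                             url_button = get_button_url_from_brackets(keyboard[i][j])
--                             keyboard[i][j] = [url_button['button_title'], '', '', url_button['url']]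
--                     else:
--                         keyboard[i][j] = [keyboard[i][j]]
--         else:
--             raise ValueError(f"Too long button row, must be 1 < . < 4")
--
--     return keyboard
--
-- def get_button_url_from_brackets(string: str) -> dict:
--     url = string[string.find("(") + 1: string.rfind(")")]
--     button_title = string.replace('(' + url + ')', '')
--     if not any(http in url for http in ['http://', 'https://']):
--         url = 'http://' + url
--     return {'button_title': button_title, 'url': url}
-- ===== SOURCE B (Python) =====
-- def get_button_url_from_brackets(string: str) -> dict:
--     url = string[string.find("(") + 1: string.rfind(")")]
--     button_title = string.replace('(' + url + ')', '')
--     if not any(http in url for http in ['http://', 'https://']):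
--         url = 'http://' + url
--     return {'button_title': button_title, 'url': url}
--
--
-- def _render_button(button, row_size):
--     if len(button) > 38:
--         raise ValueError("Too long button text")
--     if '(' in button and ')' in button:
--         if row_size > 2:
--             raise ValueError("Only ONE url-button in a row")
--         ub = get_button_url_from_brackets(button)
--         return [ub['button_title'], '', '', ub['url']]
--     return [button]
--
--
-- def _finish_row(buttons):
--     if len(buttons) > 4:
--         raise ValueError("Too long button row, must be 1 < . < 4")
--     return [_render_button(b, len(buttons)) for b in buttons]
--
--
-- def text_to_keyboard_converter(text: str):
--     # single left-to-right character scan: buttons close at '///', rows close at '\n'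
--     rows = []
--     row = []
--     buf = []
--     i = 0
--     while i < len(text):
--         if text.startswith('///', i):
--             row.append(''.join(buf))
--             buf = []
--             i += 3
--         elif text[i] == '\n':
--             row.append(''.join(buf))
--             buf = []
--             rows.append(_finish_row(row))
--             row = []
--             i += 1
--         else:
--             buf.append(text[i])
--             i += 1
--     row.append(''.join(buf))
--     rows.append(_finish_row(row))
--     return rows
-- ===== Notes on version B (the rewrite author's own statement) =====
-- stated objective: alternative
-- what changed: B replaces A's staged str.split passes with in-place index mutation by a single left-to-right character scanner that closes buttons at '///' and rows at '\n', validating and rendering each row as it completes; it never calls str.split.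
import Mathlib
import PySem

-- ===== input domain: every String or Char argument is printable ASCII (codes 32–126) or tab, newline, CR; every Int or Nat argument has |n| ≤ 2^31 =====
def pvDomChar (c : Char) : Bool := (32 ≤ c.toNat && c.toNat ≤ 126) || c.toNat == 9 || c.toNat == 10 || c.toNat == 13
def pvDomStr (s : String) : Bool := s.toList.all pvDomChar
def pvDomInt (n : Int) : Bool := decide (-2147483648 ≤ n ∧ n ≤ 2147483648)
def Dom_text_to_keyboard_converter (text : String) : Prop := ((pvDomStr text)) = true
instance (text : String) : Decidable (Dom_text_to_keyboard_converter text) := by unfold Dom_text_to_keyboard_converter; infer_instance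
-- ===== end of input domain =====

-- B replaces A's staged split passes (split '\n', split '///', in-place index mutation) by a
-- single left-to-right character scanner that never calls split; same cost, different algorithm.

-- shared module helper (both Pythons define the identical get_button_url_from_brackets)
def pvGetButtonUrl (s : String) : PySem.Dict String String :=
  let url := PySem.Str.slice s (some (PySem.Str.find s "(" + 1)) (some (PySem.Str.rfind s ")"))
  let title := PySem.Str.replace s ("(" ++ url ++ ")") ""
  let url2 := if !(PySem.Str.isIn "http://" url || PySem.Str.isIn "https://" url)
              then "http://" ++ url else url
  PySem.Dict.insert (PySem.Dict.insert (PySem.Dict.empty) "button_title" title) "url" url2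

-- str.split(sep) with nonempty sep: split? is some there, getD is exact
def pvSplit (s sep : String) : List String := (PySem.Str.split? s sep).getD []

-- ===== PORT A =====
-- the three `[]` results stand where the Python raises ValueError; those inputs are outside Pre_
def text_to_keyboard_converter (text : String) : List (List (List String)) :=
  let keyboard := pvSplit text "\n"
  let keyboard := keyboard.map (fun line => pvSplit line "///")
  keyboard.map (fun row =>
    if row.length = 1 then
      let b := row.getD 0 ""
      if PySem.Str.len b > 38 then []  -- raise "Too long button text"
      else if PySem.Str.isIn "(" b && PySem.Str.isIn ")" b then
        let u := pvGetButtonUrl b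
        [[PySem.Dict.getD u "button_title" "", "", "", PySem.Dict.getD u "url" ""]]
      else [row]
    else if 1 < row.length ∧ row.length ≤ 4 then
      row.map (fun b =>
        if PySem.Str.len b > 38 then []  -- raise "Too long button text"
        else if PySem.Str.isIn "(" b && PySem.Str.isIn ")" b then
          if row.length > 2 then []  -- raise "Only ONE url-button in a row"
          else
            let u := pvGetButtonUrl b
            [PySem.Dict.getD u "button_title" "", "", "", PySem.Dict.getD u "url" ""]
        else [b])
    else [])  -- raise "Too long button row"

-- ===== PORT B =====
-- the `[]` results stand where Source B raises ValueError; those inputs are outside Pre_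
def pvRenderButton (b : List Char) (rowSize : Nat) : List String :=
  if b.length > 38 then []  -- raise "Too long button text"
  else if PySem.Chars.isIn ['('] b && PySem.Chars.isIn [')'] b then
    if rowSize > 2 then []  -- raise "Only ONE url-button in a row"
    else
      let u := pvGetButtonUrl (String.ofList b)
      [PySem.Dict.getD u "button_title" "", "", "", PySem.Dict.getD u "url" ""]
  else [String.ofList b]

def pvFinishRow (buttons : List (List Char)) : List (List String) :=
  if buttons.length > 4 then []  -- raise "Too long button row"
  else buttons.map (fun b => pvRenderButton b buttons.length)

-- the while-loop scanner of Source B: buttons close at '///', rows close at '\n'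
def pvScan (cs : List Char) (buf : List Char) (row : List (List Char))
    (rows : List (List (List String))) : List (List (List String)) :=
  match cs with
  | '/' :: '/' :: '/' :: rest => pvScan rest [] (row ++ [buf]) rows
  | '\n' :: rest => pvScan rest [] [] (rows ++ [pvFinishRow (row ++ [buf])])
  | c :: rest => pvScan rest (buf ++ [c]) row rows
  | [] => rows ++ [pvFinishRow (row ++ [buf])]

def text_to_keyboard_converter_alt (text : String) : List (List (List String)) :=
  pvScan text.toList [] [] []

-- ===== PRECONDITION & SPEC =====
-- Pre_ excludes exactly the inputs on which A raises ValueError: a line splitting into more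
-- than 4 buttons, a button longer than 38 chars, or a '('...')' button in a row of 3 or 4.
def Pre_text_to_keyboard_converter (text : String) : Prop :=
  ∀ line ∈ (PySem.Str.split? text "\n").getD [],
    ((PySem.Str.split? line "///").getD []).length ≤ 4 ∧
    (∀ b ∈ (PySem.Str.split? line "///").getD [], PySem.Str.len b ≤ 38) ∧
    (2 < ((PySem.Str.split? line "///").getD []).length →
      ∀ b ∈ (PySem.Str.split? line "///").getD [],
        ¬ (PySem.Str.isIn "(" b = true ∧ PySem.Str.isIn ")" b = true))
instance (text : String) : Decidable (Pre_text_to_keyboard_converter text) := by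
  unfold Pre_text_to_keyboard_converter; infer_instance

def pvWitness_text_to_keyboard_converter : String := "yes///no\nsite (example.com)"

def Spec_text_to_keyboard_converter (text : String) (out : List (List (List String))) : Prop := out = text_to_keyboard_converter_alt text
instance (text : String) (out : List (List (List String))) : Decidable (Spec_text_to_keyboard_converter text out) := by unfold Spec_text_to_keyboard_converter; infer_instance

-- ===== CLAIM (what is proved, stated in full; the proofs are below) =====
def Claim_equal_text_to_keyboard_converter : Prop := ∀ (text : String), Dom_text_to_keyboard_converter text → Pre_text_to_keyboard_converter text → Spec_text_to_keyboard_converter text (text_to_keyboard_converter text)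

-- ===== LEMMAS AND PROOFS =====

-- splitOn.go: the accumulators factor out
lemma pvGo_acc (sep : List Char) (hsep : sep ≠ []) :
    ∀ fuel l cur acc, l.length < fuel →
      PySem.Chars.splitOn.go sep fuel l cur acc =
        acc.reverse ++ List.modifyHead (cur.reverse ++ ·) (PySem.Chars.splitOn.go sep fuel l [] []) := by
  intro fuel
  induction fuel with
  | zero => intro l cur acc h; omega
  | succ f ih =>
    intro l cur acc h
    match l with
    | [] => simp [PySem.Chars.splitOn.go]
    | c :: rest =>
      have hs1 : 1 ≤ sep.length := by cases sep with | nil => simp at hsep | cons a t => simp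
      rw [PySem.Chars.splitOn.go, PySem.Chars.splitOn.go]
      by_cases hp : sep.isPrefixOf (c :: rest) = true
      · simp only [hp, if_true]
        have hlen : (List.drop sep.length (c :: rest)).length < f := by
          simp only [List.length_drop, List.length_cons]; simp at h ⊢; omega
        rw [ih _ [] (cur.reverse :: acc) hlen, ih _ [] [[].reverse] hlen]
        simp
      · simp only [hp]
        have hlen : rest.length < f := by simp at h; omega
        rw [ih rest (c :: cur) acc hlen, ih rest [c] [] hlen]
        simp [List.modifyHead_modifyHead, Function.comp_def]

-- fuel irrelevance for splitOn.go
lemma pvGo_fuel (sep : List Char) (hsep : sep ≠ []) :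
    ∀ f1 f2 l, l.length < f1 → l.length < f2 →
      PySem.Chars.splitOn.go sep f1 l [] [] = PySem.Chars.splitOn.go sep f2 l [] [] := by
  intro f1
  induction f1 with
  | zero => intro f2 l h1; omega
  | succ f ih =>
    intro f2 l h1 h2
    match f2, l with
    | g + 1, [] => simp [PySem.Chars.splitOn.go]
    | g + 1, c :: rest =>
      have hs1 : 1 ≤ sep.length := by cases sep with | nil => simp at hsep | cons a t => simp
      rw [PySem.Chars.splitOn.go, PySem.Chars.splitOn.go]
      by_cases hp : sep.isPrefixOf (c :: rest) = true
      · simp only [hp, if_true]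
        have hl1 : (List.drop sep.length (c :: rest)).length < f := by
          simp only [List.length_drop, List.length_cons]; simp at h1; omega
        have hl2 : (List.drop sep.length (c :: rest)).length < g := by
          simp only [List.length_drop, List.length_cons]; simp at h2; omega
        rw [pvGo_acc sep hsep f _ [] _ hl1, pvGo_acc sep hsep g _ [] _ hl2, ih _ _ hl1 hl2]
      · simp only [hp, Bool.false_eq_true, if_false]
        have hl1 : rest.length < f := by simp at h1; omega
        have hl2 : rest.length < g := by simp at h2; omega
        rw [pvGo_acc sep hsep f _ [c] _ hl1, pvGo_acc sep hsep g _ [c] _ hl2, ih _ _ hl1 hl2]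

lemma pvSplitOn_nil (sep : List Char) : PySem.Chars.splitOn [] sep = [[]] := by
  simp [PySem.Chars.splitOn, PySem.Chars.splitOn.go]

lemma pvSplitOn_nomatch (sep : List Char) (hsep : sep ≠ []) (c : Char) (cs : List Char)
    (h : sep.isPrefixOf (c :: cs) = false) :
    PySem.Chars.splitOn (c :: cs) sep = List.modifyHead (c :: ·) (PySem.Chars.splitOn cs sep) := by
  unfold PySem.Chars.splitOn
  rw [show (c :: cs).length + 1 = (cs.length + 1) + 1 by simp, PySem.Chars.splitOn.go]
  simp only [h, Bool.false_eq_true, if_false]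
  rw [pvGo_acc sep hsep _ cs [c] [] (by omega)]
  simp

lemma pvSplitOn_match (sep : List Char) (hsep : sep ≠ []) (cs : List Char) :
    PySem.Chars.splitOn (sep ++ cs) sep = [] :: PySem.Chars.splitOn cs sep := by
  unfold PySem.Chars.splitOn
  match hs : sep with
  | a :: t =>
    rw [show ((a :: t) ++ cs) = a :: (t ++ cs) by simp]
    rw [show (a :: (t ++ cs)).length + 1 = ((t ++ cs).length + 1) + 1 by simp, PySem.Chars.splitOn.go]
    have hp : (a :: t).isPrefixOf (a :: (t ++ cs)) = true := by
      rw [List.isPrefixOf_iff_prefix]; exact ⟨cs, by simp⟩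
    simp only [hp, if_true]
    rw [show List.drop (a :: t).length (a :: (t ++ cs)) = cs by simp]
    rw [pvGo_acc (a :: t) (by simp) _ cs [] [[].reverse] (by simp)]
    rw [pvGo_fuel (a :: t) (by simp) ((t ++ cs).length + 1) (cs.length + 1) cs (by simp) (by omega)]
    cases PySem.Chars.splitOn.go (a :: t) (cs.length + 1) cs [] [] with
    | nil => simp
    | cons b bs => simp

lemma pvSplitOn_ne_nil (sep : List Char) (hsep : sep ≠ []) (l : List Char) :
    PySem.Chars.splitOn l sep ≠ [] := by
  induction l with
  | nil => rw [pvSplitOn_nil]; simp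
  | cons c cs ih =>
      by_cases hp : sep.isPrefixOf (c :: cs) = true
      · rw [List.isPrefixOf_iff_prefix] at hp
        obtain ⟨cs', he⟩ := hp
        rw [← he, pvSplitOn_match sep hsep]; simp
      · rw [pvSplitOn_nomatch sep hsep c cs (Bool.eq_false_iff.mpr hp)]
        cases h : PySem.Chars.splitOn cs sep with
        | nil => exact absurd h ih
        | cons a t => simp

lemma pvSplitOn_head_prefix (sep : List Char) (hsep : sep ≠ []) :
    ∀ (l h : List Char) (t : List (List Char)),
      PySem.Chars.splitOn l sep = h :: t → h <+: l := by
  intro l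
  induction l with
  | nil => intro h t heq; rw [pvSplitOn_nil] at heq
           cases heq; exact List.prefix_refl []
  | cons c cs ih =>
      intro h t heq
      by_cases hp : sep.isPrefixOf (c :: cs) = true
      · rw [List.isPrefixOf_iff_prefix] at hp
        obtain ⟨cs', he⟩ := hp
        rw [← he, pvSplitOn_match sep hsep] at heq
        cases heq; simp
      · rw [pvSplitOn_nomatch sep hsep c cs (Bool.eq_false_iff.mpr hp)] at heq
        cases hcs : PySem.Chars.splitOn cs sep with
        | nil => exact absurd hcs (pvSplitOn_ne_nil sep hsep cs)
        | cons a t' =>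
          rw [hcs, List.modifyHead_cons] at heq
          injection heq with h1 h2
          subst h1; subst h2
          exact List.cons_prefix_cons.mpr ⟨rfl, ih a t' hcs⟩

lemma pvModifyHead_fun_id {α : Type} (l : List α) : List.modifyHead (fun x => x) l = l := by
  cases l <;> simp

-- scanner = two-stage split (the heart of the equivalence)
lemma pvScan_eq (cs : List Char) (buf : List Char) (row : List (List Char))
    (rows : List (List (List String))) (l : List Char) (ls : List (List Char))
    (heq : PySem.Chars.splitOn cs ['\n'] = l :: ls) :
    pvScan cs buf row rows =
      rows ++ pvFinishRow (row ++ List.modifyHead (buf ++ ·) (PySem.Chars.splitOn l ['/', '/', '/']))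
           :: ls.map (fun l' => pvFinishRow (PySem.Chars.splitOn l' ['/', '/', '/'])) := by
  fun_induction pvScan cs buf row rows generalizing l ls with
  | case1 buf row rows rest ih =>
    obtain ⟨l₀, ls₀, h₀⟩ : ∃ l₀ ls₀, PySem.Chars.splitOn rest ['\n'] = l₀ :: ls₀ := by
      cases h : PySem.Chars.splitOn rest ['\n'] with
      | nil => exact absurd h (pvSplitOn_ne_nil _ (by simp) _)
      | cons a t => exact ⟨a, t, rfl⟩
    rw [pvSplitOn_nomatch ['\n'] (by simp) _ _ (by simp [List.isPrefixOf]),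
        pvSplitOn_nomatch ['\n'] (by simp) _ _ (by simp [List.isPrefixOf]),
        pvSplitOn_nomatch ['\n'] (by simp) _ _ (by simp [List.isPrefixOf]), h₀,
        List.modifyHead_cons, List.modifyHead_cons, List.modifyHead_cons] at heq
    injection heq with e1 e2
    subst e1; subst e2
    rw [ih l₀ ls₀ h₀]
    rw [show ('/' :: '/' :: '/' :: l₀) = ['/', '/', '/'] ++ l₀ by rfl,
        pvSplitOn_match ['/', '/', '/'] (by simp) l₀]
    simp [pvModifyHead_fun_id]
  | case2 buf row rows rest ih =>
    obtain ⟨l₀, ls₀, h₀⟩ : ∃ l₀ ls₀, PySem.Chars.splitOn rest ['\n'] = l₀ :: ls₀ := by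
      cases h : PySem.Chars.splitOn rest ['\n'] with
      | nil => exact absurd h (pvSplitOn_ne_nil _ (by simp) _)
      | cons a t => exact ⟨a, t, rfl⟩
    rw [show ('\n' :: rest) = ['\n'] ++ rest by rfl,
        pvSplitOn_match ['\n'] (by simp) rest, h₀] at heq
    injection heq with e1 e2
    subst e1; subst e2
    rw [ih l₀ ls₀ h₀, pvSplitOn_nil]
    simp [pvModifyHead_fun_id]
  | case3 buf row rows c rest h1 h2 ih =>
    obtain ⟨l₀, ls₀, h₀⟩ : ∃ l₀ ls₀, PySem.Chars.splitOn rest ['\n'] = l₀ :: ls₀ := by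
      cases h : PySem.Chars.splitOn rest ['\n'] with
      | nil => exact absurd h (pvSplitOn_ne_nil _ (by simp) _)
      | cons a t => exact ⟨a, t, rfl⟩
    have hc : c ≠ '\n' := fun hcc => h2 hcc
    rw [pvSplitOn_nomatch ['\n'] (by simp) c rest
          (by simp [List.isPrefixOf]; exact fun hcc => hc hcc.symm), h₀,
        List.modifyHead_cons] at heq
    injection heq with e1 e2
    subst e1; subst e2
    rw [ih l₀ ls₀ h₀]
    have hnp : (['/', '/', '/'] : List Char).isPrefixOf (c :: l₀) = false := by
      apply Bool.eq_false_iff.mpr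
      intro hp
      rw [List.isPrefixOf_iff_prefix] at hp
      rcases hp with ⟨t, ht⟩
      simp at ht
      have hpre : l₀ <+: rest := pvSplitOn_head_prefix ['\n'] (by simp) rest l₀ ls₀ h₀
      rw [← ht.2] at hpre
      rcases hpre with ⟨t2, ht2⟩
      exact h1 (t ++ t2) ht.1.symm (by rw [← ht2]; simp)
    rw [pvSplitOn_nomatch ['/', '/', '/'] (by simp) c l₀ hnp, List.modifyHead_modifyHead]
    have hfe : ((buf ++ [c]) ++ ·) = ((buf ++ ·) ∘ (c :: ·)) := by
      funext x; simp
    rw [hfe]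
  | case4 buf row rows =>
    rw [pvSplitOn_nil] at heq
    injection heq with e1 e2
    subst e1; subst e2
    rw [pvSplitOn_nil]
    simp

-- pvSplit on an ofList string, reduced to the char level
lemma pvSplit_ofList (l : List Char) (sep : String) (h : sep.toList ≠ []) :
    pvSplit (String.ofList l) sep = (PySem.Chars.splitOn l sep.toList).map String.ofList := by
  simp [pvSplit, PySem.Str.split?, PySem.Chars.split?, List.isEmpty_iff, h]

-- one line: A's row transformation agrees with Source B's finish_row
lemma pvRow_eq (l : List Char)
    (h2 : ∀ b ∈ pvSplit (String.ofList l) "///", PySem.Str.len b ≤ 38) :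
    (fun row =>
      if row.length = 1 then
        let b := row.getD 0 ""
        if PySem.Str.len b > 38 then []
        else if PySem.Str.isIn "(" b && PySem.Str.isIn ")" b then
          let u := pvGetButtonUrl b
          [[PySem.Dict.getD u "button_title" "", "", "", PySem.Dict.getD u "url" ""]]
        else [row]
      else if 1 < row.length ∧ row.length ≤ 4 then
        row.map (fun b =>
          if PySem.Str.len b > 38 then []
          else if PySem.Str.isIn "(" b && PySem.Str.isIn ")" b then
            if row.length > 2 then []
            else
              let u := pvGetButtonUrl b
              [PySem.Dict.getD u "button_title" "", "", "", PySem.Dict.getD u "url" ""]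
          else [b])
      else []) (pvSplit (String.ofList l) "///") = pvFinishRow (PySem.Chars.splitOn l ['/', '/', '/']) := by
  rw [pvSplit_ofList l "///" (by decide)] at h2 ⊢
  rw [show ("///" : String).toList = ['/', '/', '/'] from rfl] at h2 ⊢
  have hne := pvSplitOn_ne_nil ['/', '/', '/'] (by simp) l
  generalize hbs : PySem.Chars.splitOn l ['/', '/', '/'] = bs at h2 hne
  match bs with
  | [b] =>
      have hb : (b.length : Int) ≤ 38 := by
        have := h2 (String.ofList b) (by simp)
        simpa [PySem.Str.len] using this
      have e1 : PySem.Str.len (String.ofList b) = (b.length : Int) := by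
        simp [PySem.Str.len]
      have e2 : PySem.Str.isIn "(" (String.ofList b) = PySem.Chars.isIn ['('] b := by
        rw [PySem.Str.isIn]; simp
      have e3 : PySem.Str.isIn ")" (String.ofList b) = PySem.Chars.isIn [')'] b := by
        rw [PySem.Str.isIn]; simp
      simp only [List.map_cons, List.map_nil, List.length_cons, List.length_nil,
        List.getD_cons_zero]
      rw [if_pos trivial]
      unfold pvFinishRow pvRenderButton
      simp only [List.length_cons, List.length_nil, List.map_cons, List.map_nil, e1, e2, e3]
      rw [if_neg (show ¬ ((b.length : Int) > 38) by omega)]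
      rw [if_neg (show ¬ ((0 : Nat) + 1 > 4) by omega)]
      rw [if_neg (show ¬ (b.length > 38) by omega)]
      by_cases hurl : (PySem.Chars.isIn ['('] b && PySem.Chars.isIn [')'] b) = true
      · rw [if_pos hurl, if_pos hurl, if_neg (show ¬ ((0 : Nat) + 1 > 2) by omega)]
      · rw [if_neg hurl, if_neg hurl]
  | b :: b2 :: rest =>
      have hlen : (b :: b2 :: rest).length = rest.length + 2 := by simp
      beta_reduce
      rw [show ((b :: b2 :: rest).map String.ofList).length = rest.length + 2 by simp]
      rw [if_neg (by omega)]
      unfold pvFinishRow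
      by_cases h4 : rest.length + 2 ≤ 4
      · rw [if_pos (by omega), if_neg (by rw [hlen]; omega)]
        rw [List.map_map]
        refine List.map_congr_left ?_
        intro x _
        simp only [Function.comp_apply]
        unfold pvRenderButton
        have e1 : PySem.Str.len (String.ofList x) = (x.length : Int) := by
          simp [PySem.Str.len]
        have e2 : PySem.Str.isIn "(" (String.ofList x) = PySem.Chars.isIn ['('] x := by
          rw [PySem.Str.isIn]; simp
        have e3 : PySem.Str.isIn ")" (String.ofList x) = PySem.Chars.isIn [')'] x := by
          rw [PySem.Str.isIn]; simp
        rw [e1, e2, e3, hlen]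
        by_cases h38 : ((x.length : Int) > 38)
        · rw [if_pos h38, if_pos (by omega)]
        · rw [if_neg h38, if_neg (show ¬ (x.length > 38) by omega)]
      · rw [if_neg (by omega), if_pos (by rw [hlen]; omega)]

-- ===== VERDICT (by name: the statement is the Claim_ definition above) =====
theorem text_to_keyboard_converter_spec : Claim_equal_text_to_keyboard_converter := by
  intro text _ hPre
  unfold Spec_text_to_keyboard_converter text_to_keyboard_converter text_to_keyboard_converter_alt
  obtain ⟨l, ls, hl⟩ : ∃ l ls, PySem.Chars.splitOn text.toList ['\n'] = l :: ls := by
    cases h : PySem.Chars.splitOn text.toList ['\n'] with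
    | nil => exact absurd h (pvSplitOn_ne_nil _ (by simp) _)
    | cons a t => exact ⟨a, t, rfl⟩
  rw [pvScan_eq text.toList [] [] [] l ls hl]
  have hlines : pvSplit text "\n" = (PySem.Chars.splitOn text.toList ['\n']).map String.ofList := by
    simp [pvSplit, PySem.Str.split?, PySem.Chars.split?]
  have hPre' : ∀ line ∈ pvSplit text "\n", ∀ b ∈ pvSplit line "///", PySem.Str.len b ≤ 38 := by
    intro line hline
    exact (hPre line (by simpa [pvSplit] using hline)).2.1
  rw [hlines, hl] at hPre'
  rw [hlines, hl]
  simp only [List.map_cons, List.map_map, List.nil_append, pvModifyHead_fun_id]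
  refine List.cons_eq_cons.mpr ⟨?_, ?_⟩
  · exact pvRow_eq l (hPre' (String.ofList l) (by simp))
  · refine List.map_congr_left ?_
    intro l' hl'
    exact pvRow_eq l' (hPre' (String.ofList l') (by simp; exact Or.inr ⟨l', hl', rfl⟩))
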